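-- pv_equiv track=rewrite | github.com/DevilCoders/Yandex | antirobot/scripts/learn/make_learn_data/tweak/botnets/count_max_ips.py | max_ips_in_time_window
-- ===== SOURCE A (Python) =====
-- from collections import defaultdict, namedtuple
--
-- def max_ips_in_time_window(times, ips, window_size):
--     d = defaultdict(lambda: 0)
--     qt = []
--     qip = []
--     n = 0
--     for t, ip in zip(times, ips):
--         d[ip] += 1
--         qip.append(ip)
--         qt.append(t)
--         while t - qt[0] > window_size:
--             qt.pop(0)
--             ip = qip.pop(0)
--             if d[ip] == 1:
--                 del d[ip]
--             else:
--                 d[ip] -= 1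
--         n = max(n, len(d))
--     return n
-- ===== SOURCE B (Python) =====
-- def max_ips_in_time_window(times, ips, window_size):
--     pairs = list(zip(times, ips))
--     left = 0
--     ans = 0
--     for i in range(len(pairs)):
--         t = pairs[i][0]
--         while t - pairs[left][0] > window_size:
--             left += 1
--         ans = max(ans, len(set(ip for _, ip in pairs[left:i + 1])))
--     return ans
-- ===== Notes on version B (the rewrite author's own statement) =====
-- stated objective: simpler
-- what changed: Replaces A's mutable deques plus a decrementing defaultdict counter with a single forward-only left index and a per-step len(set(...)) over the current window slice; no incremental count bookkeeping.
import Mathlib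
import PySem

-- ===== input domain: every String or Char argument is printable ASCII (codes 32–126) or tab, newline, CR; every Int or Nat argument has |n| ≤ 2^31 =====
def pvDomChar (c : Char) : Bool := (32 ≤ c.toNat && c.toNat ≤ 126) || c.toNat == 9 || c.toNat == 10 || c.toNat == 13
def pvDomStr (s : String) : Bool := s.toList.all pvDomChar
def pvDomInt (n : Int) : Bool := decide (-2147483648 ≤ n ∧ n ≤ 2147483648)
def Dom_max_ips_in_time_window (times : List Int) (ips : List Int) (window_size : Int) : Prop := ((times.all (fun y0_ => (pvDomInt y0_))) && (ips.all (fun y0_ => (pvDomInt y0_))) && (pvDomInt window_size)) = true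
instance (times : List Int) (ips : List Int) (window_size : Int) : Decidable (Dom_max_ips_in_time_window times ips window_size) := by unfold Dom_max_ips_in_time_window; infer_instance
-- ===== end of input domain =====

-- B replaces A's deque-plus-decrementing-counter bookkeeping by a forward-only left
-- index and a per-step distinct-count of the current window slice (objective: simpler).

-- ===== PORT A =====
-- the inner `while t - qt[0] > window_size` loop: pops the front of qt/qip and
-- downdates the counter d; an empty qt means Python's qt[0] raises IndexError
-- (such inputs are excluded by Pre_), here it just stops.
def pvPopLoopA (window_size t : Int) :
    List Int → List Int → PySem.Dict Int Int → PySem.Dict Int Int × List Int × List Int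
  | t0 :: qt, qip, d =>
    if t - t0 > window_size then
      match qip with
      | ip :: qip' =>
        let d' := if d.getD ip 0 = 1 then d.erase ip else d.insert ip (d.getD ip 0 - 1)
        pvPopLoopA window_size t qt qip' d'
      | [] => (d, t0 :: qt, [])   -- unreachable: qt and qip always have equal length
    else (d, t0 :: qt, qip)
  | [], qip, d => (d, [], qip)    -- Python raises IndexError here; excluded by Pre_

-- one iteration of A's `for t, ip in zip(times, ips)` body; state = (d, qt, qip, n)
def pvStepA (window_size : Int) (st : PySem.Dict Int Int × List Int × List Int × Int)
    (p : Int × Int) : PySem.Dict Int Int × List Int × List Int × Int :=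
  let d := st.1.modify p.2 0 (· + 1)       -- d[ip] += 1  (defaultdict)
  let qip := st.2.2.1 ++ [p.2]             -- qip.append(ip)
  let qt := st.2.1 ++ [p.1]                -- qt.append(t)
  let r := pvPopLoopA window_size p.1 qt qip d
  (r.1, r.2.1, r.2.2, max st.2.2.2 (r.1.size : Int))   -- n = max(n, len(d))

def max_ips_in_time_window (times : List Int) (ips : List Int) (window_size : Int) : Int :=
  ((times.zip ips).foldl (pvStepA window_size) (PySem.Dict.empty, [], [], 0)).2.2.2

-- ===== PORT B =====
-- B's `while t - pairs[left][0] > window_size: left += 1`; an out-of-range left means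
-- Python's pairs[left] raises IndexError (excluded by Pre_), here it just stops.
def pvAdvanceB (pairs : List (Int × Int)) (window_size t : Int) (left : Nat) : Nat :=
  if h : left < pairs.length then
    if t - (pairs[left]).1 > window_size then pvAdvanceB pairs window_size t (left + 1)
    else left
  else left
termination_by pairs.length - left
decreasing_by omega

-- one iteration of B's `for i in range(len(pairs))` body; state = (left, ans)
def pvStepB (pairs : List (Int × Int)) (window_size : Int) (st : Nat × Int) (i : Nat) :
    Nat × Int :=
  let t := (pairs.getD i (0, 0)).1          -- pairs[i][0]; i ∈ range(len(pairs)), in bounds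
  let left := pvAdvanceB pairs window_size t st.1
  let win := PySem.List.slice pairs (some (left : Int)) (some ((i : Int) + 1))  -- pairs[left:i+1]
  (left, max st.2 (PySem.Set.len (PySem.Set.ofList (win.map (·.2)))))

def max_ips_in_time_window_alt (times : List Int) (ips : List Int) (window_size : Int) : Int :=
  let pairs := times.zip ips
  ((List.range pairs.length).foldl (pvStepB pairs window_size) (0, 0)).2

-- ===== PRECONDITION & SPEC =====
-- Pre_ excludes exactly the inputs on which A raises IndexError: a negative
-- window_size with a nonempty zip empties the queue on the first iteration and
-- Python's qt[0] then raises.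
def Pre_max_ips_in_time_window (times : List Int) (ips : List Int) (window_size : Int) : Prop :=
  times = [] ∨ ips = [] ∨ 0 ≤ window_size
instance (times : List Int) (ips : List Int) (window_size : Int) :
    Decidable (Pre_max_ips_in_time_window times ips window_size) := by
  unfold Pre_max_ips_in_time_window; infer_instance

def pvWitness_max_ips_in_time_window : List Int × List Int × Int := ([0, 1, 2], [5, 5, 7], 1)

def Spec_max_ips_in_time_window (times : List Int) (ips : List Int) (window_size : Int) (out : Int) : Prop := out = max_ips_in_time_window_alt times ips window_size
instance (times : List Int) (ips : List Int) (window_size : Int) (out : Int) : Decidable (Spec_max_ips_in_time_window times ips window_size out) := by unfold Spec_max_ips_in_time_window; infer_instance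

-- ===== CLAIM (what is proved, stated in full; the proofs are below) =====
def Claim_equal_max_ips_in_time_window : Prop := ∀ (times : List Int) (ips : List Int) (window_size : Int), Dom_max_ips_in_time_window times ips window_size → Pre_max_ips_in_time_window times ips window_size → Spec_max_ips_in_time_window times ips window_size (max_ips_in_time_window times ips window_size)

-- ===== LEMMAS AND PROOFS =====

-- facts about Dict.erase (the library has none)
theorem pv_get?_erase (d : PySem.Dict Int Int) (k k' : Int) :
    (d.erase k).get? k' = if k' = k then none else d.get? k' := by
  simp only [PySem.Dict.erase, PySem.Dict.get?, List.find?_filter]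
  split
  · subst k'
    rw [List.find?_eq_none.mpr (by intro p _; simp)]
    rfl
  · rename_i hne
    have hfun : (fun a : Int × Int => decide ((!a.1 == k) = true ∧ (a.1 == k') = true))
        = (fun a : Int × Int => a.1 == k') := by
      funext p
      by_cases h : p.1 = k' <;> simp [h, hne]
    rw [hfun]

theorem pv_keys_erase (d : PySem.Dict Int Int) (k : Int) :
    (d.erase k).keys = d.keys.filter (fun x => !(x == k)) := by
  simp only [PySem.Dict.erase, PySem.Dict.keys, List.filter_map]
  rfl

theorem pv_getD_erase (d : PySem.Dict Int Int) (k k' : Int) :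
    (d.erase k).getD k' 0 = if k' = k then 0 else d.getD k' 0 := by
  simp only [PySem.Dict.getD, pv_get?_erase]
  split <;> rfl

-- invariant tying A's counter dict to the ip-list of the current window
def pvInv (d : PySem.Dict Int Int) (w : List Int) : Prop :=
  d.keys.Nodup ∧ (∀ x : Int, d.getD x 0 = (w.count x : Int)) ∧ (∀ k ∈ d.keys, k ∈ w)

theorem pvInv_empty : pvInv PySem.Dict.empty [] := by
  refine ⟨?_, ?_, ?_⟩ <;> simp [PySem.Dict.keys_empty, PySem.Dict.getD_empty]

theorem pv_contains_of_getD_ne {d : PySem.Dict Int Int} {k : Int}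
    (h : d.getD k 0 ≠ 0) : d.contains k = true := by
  by_contra hc
  exact h (PySem.Dict.getD_of_not_contains d 0 (by simpa using hc))

-- len(d) is the number of distinct ips in the window
theorem pvInv_size {d : PySem.Dict Int Int} {w : List Int} (h : pvInv d w) :
    (d.size : Int) = PySem.Set.len (PySem.Set.ofList w) := by
  obtain ⟨hnd, hcnt, hsub⟩ := h
  have hmem : ∀ k : Int, k ∈ d.keys ↔ k ∈ PySem.Set.ofList w := by
    intro k
    rw [PySem.Set.mem_ofList]
    constructor
    · exact hsub k
    · intro hk
      have : d.getD k 0 ≠ 0 := by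
        rw [hcnt k]
        have := List.count_pos_iff.mpr hk
        omega
      exact (PySem.Dict.contains_iff_mem_keys d k).mp (pv_contains_of_getD_ne this)
  have hperm : d.keys.Perm (PySem.Set.ofList w) :=
    (List.perm_ext_iff_of_nodup hnd (PySem.Set.nodup_ofList w)).mpr hmem
  have : d.size = d.keys.length := by simp [PySem.Dict.size, PySem.Dict.keys]
  rw [this, PySem.Set.len, hperm.length_eq]

theorem pvInv_incr {d : PySem.Dict Int Int} {w : List Int} (h : pvInv d w) (x : Int) :
    pvInv (d.modify x 0 (· + 1)) (w ++ [x]) := by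
  obtain ⟨hnd, hcnt, hsub⟩ := h
  refine ⟨?_, ?_, ?_⟩
  · rw [PySem.Dict.keys_modify]
    exact PySem.Dict.nodup_keys_insert d x _ hnd
  · intro y
    rw [PySem.Dict.getD_modify]
    rw [List.count_append]
    by_cases hy : y = x
    · simp [hy, hcnt x]
    · simp [hy, hcnt y, List.count_singleton]
      omega
  · intro k hk
    rw [PySem.Dict.keys_modify] at hk
    rcases (PySem.Dict.mem_keys_insert d _ _ _).mp hk with rfl | hk
    · simp
    · exact List.mem_append_left _ (hsub k hk)

theorem pvInv_pop {d : PySem.Dict Int Int} {x : Int} {w : List Int} (h : pvInv d (x :: w)) :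
    pvInv (if d.getD x 0 = 1 then d.erase x else d.insert x (d.getD x 0 - 1)) w := by
  obtain ⟨hnd, hcnt, hsub⟩ := h
  have hcx : (x :: w).count x = w.count x + 1 := by simp
  have hcy : ∀ y : Int, y ≠ x → (x :: w).count y = w.count y := by
    intro y hy; simp [Ne.symm hy]
  have hx : d.getD x 0 = (w.count x : Int) + 1 := by
    rw [hcnt x, hcx]; push_cast; ring
  split
  · rename_i h1
    have hxw : x ∉ w := by
      rw [hx] at h1
      have : w.count x = 0 := by omega
      exact List.count_eq_zero.mp this
    refine ⟨?_, ?_, ?_⟩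
    · rw [pv_keys_erase]; exact hnd.filter _
    · intro y
      rw [pv_getD_erase]
      by_cases hy : y = x
      · subst hy; simp [List.count_eq_zero.mpr hxw]
      · rw [if_neg hy, hcnt y, hcy y hy]
    · intro k hk
      rw [pv_keys_erase] at hk
      simp only [List.mem_filter] at hk
      obtain ⟨hk1, hk2⟩ := hk
      simp at hk2
      rcases List.mem_cons.mp (hsub k hk1) with rfl | hm
      · exact absurd rfl hk2
      · exact hm
  · rename_i h1
    have hcont : d.contains x = true := pv_contains_of_getD_ne (by rw [hx]; omega)
    have hxw : x ∈ w := by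
      have : w.count x ≠ 0 := by
        intro hz
        exact h1 (by rw [hx, hz]; ring)
      exact List.count_pos_iff.mp (Nat.pos_of_ne_zero this)
    refine ⟨?_, ?_, ?_⟩
    · rw [PySem.Dict.keys_insert_of_contains d _ hcont]; exact hnd
    · intro y
      rw [PySem.Dict.getD_insert]
      by_cases hy : y = x
      · subst hy; rw [if_pos rfl, hx]; ring
      · rw [if_neg hy, hcnt y, hcy y hy]
    · intro k hk
      rw [PySem.Dict.keys_insert_of_contains d _ hcont] at hk
      rcases List.mem_cons.mp (hsub k hk) with rfl | hm
      · exact hxw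
      · exact hm

-- the common specification of both while loops: drop window entries from the front
-- while the current time t is more than window_size ahead of their time
def pvShrink (window_size t : Int) : List (Int × Int) → List (Int × Int)
  | [] => []
  | p :: W => if t - p.1 > window_size then pvShrink window_size t W else p :: W

theorem pvShrink_suffix (ws t : Int) (W : List (Int × Int)) :
    pvShrink ws t W <:+ W := by
  induction W with
  | nil => simp [pvShrink]
  | cons p W ih =>
    simp only [pvShrink]
    split
    · exact ih.trans (List.suffix_cons p W)
    · exact List.suffix_rfl

theorem pvShrink_append {ws t : Int} {X : List (Int × Int)} (Y : List (Int × Int))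
    (h : ∃ p ∈ X, ¬ t - p.1 > ws) :
    pvShrink ws t (X ++ Y) = pvShrink ws t X ++ Y := by
  induction X with
  | nil => simp at h
  | cons p X ih =>
    simp only [List.cons_append, pvShrink]
    split
    · rename_i hp
      obtain ⟨q, hq, hq'⟩ := h
      rcases List.mem_cons.mp hq with rfl | hq
      · exact absurd hp hq'
      · exact ih ⟨q, hq, hq'⟩
    · rfl

-- A's pop loop realises pvShrink and preserves the invariant
theorem pvPopLoopA_eq (ws t : Int) :
    ∀ (W : List (Int × Int)) (d : PySem.Dict Int Int),
      pvInv d (W.map (·.2)) → (∃ p ∈ W, ¬ t - p.1 > ws) →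
      ∃ d', pvPopLoopA ws t (W.map (·.1)) (W.map (·.2)) d =
              (d', (pvShrink ws t W).map (·.1), (pvShrink ws t W).map (·.2))
            ∧ pvInv d' ((pvShrink ws t W).map (·.2)) := by
  intro W
  induction W with
  | nil => intro d _ h; simp at h
  | cons p W ih =>
    intro d hInv hw
    simp only [List.map_cons, pvPopLoopA, pvShrink]
    split
    · rename_i hp
      obtain ⟨q, hq, hq'⟩ := hw
      rcases List.mem_cons.mp hq with rfl | hq
      · exact absurd hp hq'
      · exact ih _ (pvInv_pop hInv) ⟨q, hq, hq'⟩
    · exact ⟨d, rfl, hInv⟩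

-- B's left-advance loop realises pvShrink too
theorem pvAdvanceB_eq (pairs : List (Int × Int)) (ws t : Int) :
    ∀ (fuel left : Nat), fuel = pairs.length - left → left ≤ pairs.length →
      (∃ p ∈ pairs.drop left, ¬ t - p.1 > ws) →
      pvAdvanceB pairs ws t left = pairs.length - (pvShrink ws t (pairs.drop left)).length := by
  intro fuel
  induction fuel with
  | zero =>
    intro left hf hle h
    have : left = pairs.length := by omega
    subst this
    simp at h
  | succ f ih =>
    intro left hf hle h
    have hlt : left < pairs.length := by
      by_contra hc
      have : left = pairs.length := by omega
      subst this; simp at h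
    have hdrop : pairs.drop left = pairs[left] :: pairs.drop (left + 1) :=
      List.drop_eq_getElem_cons hlt
    rw [pvAdvanceB, dif_pos hlt, hdrop]
    simp only [pvShrink]
    split
    · rename_i hp
      rw [ih (left + 1) (by omega) (by omega)]
      obtain ⟨q, hq, hq'⟩ := h
      rw [hdrop] at hq
      rcases List.mem_cons.mp hq with rfl | hq
      · exact absurd hp hq'
      · exact ⟨q, hq, hq'⟩
    · have hl : (pairs.drop (left+1)).length = pairs.length - (left+1) := by simp
      simp only [List.length_cons, hl]
      omega

-- main loop correspondence: A's fold over the remaining pairs and B's fold over the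
-- remaining indices produce the same answer from matching states
theorem pvLoop_eq (ws : Int) (hw : 0 ≤ ws) (L : List (Int × Int)) :
    ∀ (fuel j left : Nat) (d : PySem.Dict Int Int) (n : Int),
      fuel = L.length - j → left ≤ j → j ≤ L.length →
      pvInv d (((L.take j).drop left).map (·.2)) →
      ((L.drop j).foldl (pvStepA ws)
          (d, ((L.take j).drop left).map (·.1), ((L.take j).drop left).map (·.2), n)).2.2.2
        = ((List.range' j (L.length - j)).foldl (pvStepB L ws) (left, n)).2 := by
  intro fuel
  induction fuel with
  | zero =>
    intro j left d n hf hlj hjl hInv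
    have hj : j = L.length := by omega
    subst hj
    simp
  | succ f ih =>
    intro j left d n hf hlj hjl hInv
    have hj : j < L.length := by omega
    set p := L[j] with hp
    -- unfold one step on each side
    have hdropj : L.drop j = p :: L.drop (j + 1) := List.drop_eq_getElem_cons hj
    have hrange : List.range' j (L.length - j) = j :: List.range' (j + 1) (L.length - (j + 1)) := by
      have : L.length - j = (L.length - (j + 1)) + 1 := by omega
      rw [this, List.range'_succ]
    -- the appended window
    have htake1 : L.take (j + 1) = L.take j ++ [p] := by
      exact List.take_succ_eq_append_getElem hj
    have hlen_take : (L.take j).length = j := by simp; omega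
    have hX1 : (L.take (j + 1)).drop left = ((L.take j).drop left) ++ [p] := by
      rw [htake1, List.drop_append, hlen_take]
      have : left - j = 0 := by omega
      simp [this]
    set X := (L.take j).drop left with hXdef
    set X1 := (L.take (j + 1)).drop left with hX1def
    have hwit : ∃ q ∈ X1, ¬ p.1 - q.1 > ws := by
      refine ⟨p, by rw [hX1]; simp, by omega⟩
    -- A's step
    have hInv1 : pvInv (d.modify p.2 0 (· + 1)) (X1.map (·.2)) := by
      rw [hX1, List.map_append]
      exact pvInv_incr hInv p.2
    obtain ⟨d', hpop, hInv'⟩ := pvPopLoopA_eq ws p.1 X1 _ hInv1 hwit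
    have hstepA : pvStepA ws (d, X.map (·.1), X.map (·.2), n) p
        = (d', (pvShrink ws p.1 X1).map (·.1), (pvShrink ws p.1 X1).map (·.2),
            max n (d'.size : Int)) := by
      have hm1 : X.map (·.1) ++ [p.1] = X1.map (·.1) := by rw [hX1, List.map_append]; rfl
      have hm2 : X.map (·.2) ++ [p.2] = X1.map (·.2) := by rw [hX1, List.map_append]; rfl
      simp only [pvStepA]
      rw [hm1, hm2, hpop]
    -- B's step
    have hlen1 : (L.take (j+1)).length = j + 1 := by simp; omega
    have hXsuffix : pvShrink ws p.1 X1 <:+ L.take (j + 1) :=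
      (pvShrink_suffix ws p.1 X1).trans (List.drop_suffix _ _)
    have hshlen : (pvShrink ws p.1 X1).length ≤ j + 1 - left := by
      have h1 := (pvShrink_suffix ws p.1 X1).length_le
      have h2 : X1.length = j + 1 - left := by rw [hX1def]; simp; omega
      omega
    have hdropleft : L.drop left = X1 ++ L.drop (j + 1) := by
      conv_lhs => rw [← List.take_append_drop (j+1) L]
      rw [List.drop_append, hlen1]
      have : left - (j+1) = 0 := by omega
      simp [this, hX1def]
    have hshr : pvShrink ws p.1 (L.drop left) = pvShrink ws p.1 X1 ++ L.drop (j + 1) := by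
      rw [hdropleft]; exact pvShrink_append _ hwit
    have hadv : pvAdvanceB L ws p.1 left = j + 1 - (pvShrink ws p.1 X1).length := by
      rw [pvAdvanceB_eq L ws p.1 (L.length - left) left rfl (by omega)
            ⟨p, by rw [hdropleft, hX1]; simp, by omega⟩, hshr]
      simp only [List.length_append, List.length_drop]
      omega
    set left' := j + 1 - (pvShrink ws p.1 X1).length with hleft'
    have hdropleft' : L.drop left' = pvShrink ws p.1 X1 ++ L.drop (j + 1) := by
      rw [← hshr]
      have hs : pvShrink ws p.1 (L.drop left) <:+ L :=
        (pvShrink_suffix ws p.1 _).trans (List.drop_suffix _ _)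
      have := List.suffix_iff_eq_drop.mp hs
      rw [this]
      congr 1
      rw [hshr]
      simp
      omega
    have htB : (L.getD j ((0:Int), (0:Int))).1 = p.1 := by
      rw [List.getD_eq_getElem L _ hj]
    have hstepB : pvStepB L ws (left, n) j
        = (left', max n (PySem.Set.len (PySem.Set.ofList ((pvShrink ws p.1 X1).map (·.2))))) := by
      simp only [pvStepB, htB, hadv]
      congr 2
      have hcast : ((j : Int) + 1) = ((j + 1 : Nat) : Int) := by push_cast; ring
      rw [hcast, PySem.List.slice_natCast, hdropleft']
      have : j + 1 - left' = (pvShrink ws p.1 X1).length := by omega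
      rw [this, List.take_left']
      rfl
    -- new window invariant
    have hwin' : (L.take (j + 1)).drop left' = pvShrink ws p.1 X1 := by
      have := List.suffix_iff_eq_drop.mp hXsuffix
      rw [this, hlen1]
    have hsize : (d'.size : Int) = PySem.Set.len (PySem.Set.ofList ((pvShrink ws p.1 X1).map (·.2))) :=
      pvInv_size hInv'
    rw [hdropj, hrange, List.foldl_cons, List.foldl_cons, hstepA, hstepB, ← hsize, ← hwin']
    exact ih (j + 1) left' d' _ (by omega) (by omega) (by omega) (by rw [hwin']; exact hInv')

-- ===== VERDICT (by name: the statement is the Claim_ definition above) =====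
theorem max_ips_in_time_window_spec : Claim_equal_max_ips_in_time_window := by
  intro times ips ws _ hpre
  unfold Spec_max_ips_in_time_window Pre_max_ips_in_time_window at *
  unfold max_ips_in_time_window max_ips_in_time_window_alt
  by_cases hw : 0 ≤ ws
  · have := pvLoop_eq ws hw (times.zip ips) (times.zip ips).length 0 0 PySem.Dict.empty 0
      (by simp) (le_refl 0) (Nat.zero_le _) (by simpa using pvInv_empty)
    simpa [List.range_eq_range'] using this
  · rcases hpre with h | h | h
    · subst h; simp
    · subst h; simp [List.zip_nil_right]
    · exact absurd h hw
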